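-- pv_equiv track=rewrite | github.com/natemago/adventofcode-2021 | day24-arithmetic-logic-unit/solution.py | rev_procedure_3
-- ===== SOURCE A (Python) =====
-- def rev_procedure_3(target):
--     results = {}
--
--     for w in range(1, 10):
--         p = target - w - 13
--         if p < 0:
--             continue
--         if p % 26:
--             continue
--         results[w] = results.get(w) or []
--         results[w].append(p//26)
--
--     return results
-- ===== SOURCE B (Python) =====
-- def rev_procedure_3(target):
--     # closed form: w must satisfy w == (target - 13) (mod 26), so at most one
--     # candidate r in 1..9 exists; no loop needed.
--     r = (target - 13) % 26
--     if 1 <= r <= 9 and target - r - 13 >= 0: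
--         return {r: [(target - r - 13) // 26]}
--     return {}
-- ===== Notes on version B (the rewrite author's own statement) =====
-- stated objective: simpler
-- what changed: Replaces the 9-iteration search loop with a closed form: the unique residue r = (target-13) % 26 is the only possible w, so the dict is built directly from one arithmetic test.
import Mathlib
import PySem

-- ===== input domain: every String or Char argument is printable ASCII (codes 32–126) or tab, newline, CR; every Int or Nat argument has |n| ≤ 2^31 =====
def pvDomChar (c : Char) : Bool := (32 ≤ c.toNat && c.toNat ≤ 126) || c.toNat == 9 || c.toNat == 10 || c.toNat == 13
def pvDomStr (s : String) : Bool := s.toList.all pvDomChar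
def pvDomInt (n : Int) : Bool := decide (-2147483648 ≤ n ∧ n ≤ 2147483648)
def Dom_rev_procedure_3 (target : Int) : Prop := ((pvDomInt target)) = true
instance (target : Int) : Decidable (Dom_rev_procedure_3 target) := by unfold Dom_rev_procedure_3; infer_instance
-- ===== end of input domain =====

-- B replaces A's 9-iteration search loop by the closed-form unique residue r = (target-13) % 26 (simpler).


-- ===== PORT A =====
-- loop body of A, named so the fold can be reasoned about step by step
def revStep3 (target : Int) (d : PySem.Dict Int (List Int)) (w : Int) : PySem.Dict Int (List Int) :=
  let p := target - w - 13
  if p < 0 then d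
  else if PySem.Int.mod p 26 ≠ 0 then d
  else
    -- results[w] = results.get(w) or []
    let cur : List Int :=
      match d.get? w with
      | none => []
      | some v => if v = [] then [] else v
    let d := d.insert w cur
    -- results[w].append(p // 26)
    d.insert w (cur ++ [PySem.Int.floordiv p 26])

def rev_procedure_3 (target : Int) : List (Int × List Int) :=
  ((PySem.List.pyRange 1 10 1).foldl (revStep3 target) PySem.Dict.empty).items

-- ===== PORT B =====
def rev_procedure_3_alt (target : Int) : List (Int × List Int) :=
  let r := PySem.Int.mod (target - 13) 26
  if 1 ≤ r ∧ r ≤ 9 ∧ target - r - 13 ≥ 0 then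
    [(r, [PySem.Int.floordiv (target - r - 13) 26])]
  else []

-- ===== PRECONDITION & SPEC =====
def Spec_rev_procedure_3 (target : Int) (out : List (Int × List Int)) : Prop := out = rev_procedure_3_alt target
instance (target : Int) (out : List (Int × List Int)) : Decidable (Spec_rev_procedure_3 target out) := by unfold Spec_rev_procedure_3; infer_instance

-- ===== CLAIM (what is proved, stated in full; the proofs are below) =====
def Claim_equal_rev_procedure_3 : Prop := ∀ (target : Int), Dom_rev_procedure_3 target → Spec_rev_procedure_3 target (rev_procedure_3 target)

-- ===== LEMMAS AND PROOFS =====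

lemma mod26 (a : Int) : PySem.Int.mod a 26 = a % 26 :=
  PySem.Int.mod_eq_emod_of_pos (by norm_num)

lemma iter_neg (target : Int) (d : PySem.Dict Int (List Int)) (w : Int)
    (h : target - w - 13 < 0) : revStep3 target d w = d := by
  simp [revStep3, h]

lemma iter_skip (target : Int) (d : PySem.Dict Int (List Int)) (w : Int)
    (h : (target - w - 13) % 26 ≠ 0) : revStep3 target d w = d := by
  simp [revStep3, h]

lemma iter_hit (target : Int) (w : Int)
    (h0 : ¬ target - w - 13 < 0) (hm : (target - w - 13) % 26 = 0) :
    revStep3 target PySem.Dict.empty w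
      = PySem.Dict.mk [(w, [(target - w - 13) / 26])] := by
  simp [revStep3, h0, hm, PySem.Dict.empty, PySem.Dict.insert, PySem.Dict.get?, PySem.Dict.contains]

lemma range9 : PySem.List.pyRange 1 10 1 = [1,2,3,4,5,6,7,8,9] := by decide

-- ===== VERDICT (by name: the statement is the Claim_ definition above) =====
theorem rev_procedure_3_spec : Claim_equal_rev_procedure_3 := by
  intro target _
  unfold Spec_rev_procedure_3 rev_procedure_3 rev_procedure_3_alt
  rw [range9]
  simp only [List.foldl]
  rw [mod26 (target - 13), PySem.Int.floordiv_eq_ediv_of_pos (b := 26) (by norm_num)]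
  by_cases hr9 : 1 ≤ (target - 13) % 26 ∧ (target - 13) % 26 ≤ 9
  · have hr' : (target - 13) % 26 = 1 ∨ (target - 13) % 26 = 2 ∨ (target - 13) % 26 = 3 ∨ (target - 13) % 26 = 4 ∨ (target - 13) % 26 = 5 ∨ (target - 13) % 26 = 6 ∨ (target - 13) % 26 = 7 ∨ (target - 13) % 26 = 8 ∨ (target - 13) % 26 = 9 := by omega
    rcases hr' with hr | hr | hr | hr | hr | hr | hr | hr | hr
    · -- r = 1
      by_cases hp : target - 1 - 13 < 0
      · rw [iter_skip target _ 2 (by omega), iter_skip target _ 3 (by omega), iter_skip target _ 4 (by omega), iter_skip target _ 5 (by omega), iter_skip target _ 6 (by omega), iter_skip target _ 7 (by omega), iter_skip target _ 8 (by omega), iter_skip target _ 9 (by omega), iter_neg target _ 1 hp]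
        rw [if_neg (by omega)]
        rfl
      · rw [iter_skip target _ 2 (by omega), iter_skip target _ 3 (by omega), iter_skip target _ 4 (by omega), iter_skip target _ 5 (by omega), iter_skip target _ 6 (by omega), iter_skip target _ 7 (by omega), iter_skip target _ 8 (by omega), iter_skip target _ 9 (by omega), iter_hit target 1 hp (by omega)]
        rw [if_pos (by omega), hr]
    · -- r = 2
      by_cases hp : target - 2 - 13 < 0
      · rw [iter_skip target _ 1 (by omega), iter_skip target _ 3 (by omega), iter_skip target _ 4 (by omega), iter_skip target _ 5 (by omega), iter_skip target _ 6 (by omega), iter_skip target _ 7 (by omega), iter_skip target _ 8 (by omega), iter_skip target _ 9 (by omega), iter_neg target _ 2 hp]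
        rw [if_neg (by omega)]
        rfl
      · rw [iter_skip target _ 1 (by omega), iter_skip target _ 3 (by omega), iter_skip target _ 4 (by omega), iter_skip target _ 5 (by omega), iter_skip target _ 6 (by omega), iter_skip target _ 7 (by omega), iter_skip target _ 8 (by omega), iter_skip target _ 9 (by omega), iter_hit target 2 hp (by omega)]
        rw [if_pos (by omega), hr]
    · -- r = 3
      by_cases hp : target - 3 - 13 < 0
      · rw [iter_skip target _ 1 (by omega), iter_skip target _ 2 (by omega), iter_skip target _ 4 (by omega), iter_skip target _ 5 (by omega), iter_skip target _ 6 (by omega), iter_skip target _ 7 (by omega), iter_skip target _ 8 (by omega), iter_skip target _ 9 (by omega), iter_neg target _ 3 hp]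
        rw [if_neg (by omega)]
        rfl
      · rw [iter_skip target _ 1 (by omega), iter_skip target _ 2 (by omega), iter_skip target _ 4 (by omega), iter_skip target _ 5 (by omega), iter_skip target _ 6 (by omega), iter_skip target _ 7 (by omega), iter_skip target _ 8 (by omega), iter_skip target _ 9 (by omega), iter_hit target 3 hp (by omega)]
        rw [if_pos (by omega), hr]
    · -- r = 4
      by_cases hp : target - 4 - 13 < 0
      · rw [iter_skip target _ 1 (by omega), iter_skip target _ 2 (by omega), iter_skip target _ 3 (by omega), iter_skip target _ 5 (by omega), iter_skip target _ 6 (by omega), iter_skip target _ 7 (by omega), iter_skip target _ 8 (by omega), iter_skip target _ 9 (by omega), iter_neg target _ 4 hp]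
        rw [if_neg (by omega)]
        rfl
      · rw [iter_skip target _ 1 (by omega), iter_skip target _ 2 (by omega), iter_skip target _ 3 (by omega), iter_skip target _ 5 (by omega), iter_skip target _ 6 (by omega), iter_skip target _ 7 (by omega), iter_skip target _ 8 (by omega), iter_skip target _ 9 (by omega), iter_hit target 4 hp (by omega)]
        rw [if_pos (by omega), hr]
    · -- r = 5
      by_cases hp : target - 5 - 13 < 0
      · rw [iter_skip target _ 1 (by omega), iter_skip target _ 2 (by omega), iter_skip target _ 3 (by omega), iter_skip target _ 4 (by omega), iter_skip target _ 6 (by omega), iter_skip target _ 7 (by omega), iter_skip target _ 8 (by omega), iter_skip target _ 9 (by omega), iter_neg target _ 5 hp]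
        rw [if_neg (by omega)]
        rfl
      · rw [iter_skip target _ 1 (by omega), iter_skip target _ 2 (by omega), iter_skip target _ 3 (by omega), iter_skip target _ 4 (by omega), iter_skip target _ 6 (by omega), iter_skip target _ 7 (by omega), iter_skip target _ 8 (by omega), iter_skip target _ 9 (by omega), iter_hit target 5 hp (by omega)]
        rw [if_pos (by omega), hr]
    · -- r = 6
      by_cases hp : target - 6 - 13 < 0
      · rw [iter_skip target _ 1 (by omega), iter_skip target _ 2 (by omega), iter_skip target _ 3 (by omega), iter_skip target _ 4 (by omega), iter_skip target _ 5 (by omega), iter_skip target _ 7 (by omega), iter_skip target _ 8 (by omega), iter_skip target _ 9 (by omega), iter_neg target _ 6 hp]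
        rw [if_neg (by omega)]
        rfl
      · rw [iter_skip target _ 1 (by omega), iter_skip target _ 2 (by omega), iter_skip target _ 3 (by omega), iter_skip target _ 4 (by omega), iter_skip target _ 5 (by omega), iter_skip target _ 7 (by omega), iter_skip target _ 8 (by omega), iter_skip target _ 9 (by omega), iter_hit target 6 hp (by omega)]
        rw [if_pos (by omega), hr]
    · -- r = 7
      by_cases hp : target - 7 - 13 < 0
      · rw [iter_skip target _ 1 (by omega), iter_skip target _ 2 (by omega), iter_skip target _ 3 (by omega), iter_skip target _ 4 (by omega), iter_skip target _ 5 (by omega), iter_skip target _ 6 (by omega), iter_skip target _ 8 (by omega), iter_skip target _ 9 (by omega), iter_neg target _ 7 hp]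
        rw [if_neg (by omega)]
        rfl
      · rw [iter_skip target _ 1 (by omega), iter_skip target _ 2 (by omega), iter_skip target _ 3 (by omega), iter_skip target _ 4 (by omega), iter_skip target _ 5 (by omega), iter_skip target _ 6 (by omega), iter_skip target _ 8 (by omega), iter_skip target _ 9 (by omega), iter_hit target 7 hp (by omega)]
        rw [if_pos (by omega), hr]
    · -- r = 8
      by_cases hp : target - 8 - 13 < 0
      · rw [iter_skip target _ 1 (by omega), iter_skip target _ 2 (by omega), iter_skip target _ 3 (by omega), iter_skip target _ 4 (by omega), iter_skip target _ 5 (by omega), iter_skip target _ 6 (by omega), iter_skip target _ 7 (by omega), iter_skip target _ 9 (by omega), iter_neg target _ 8 hp]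
        rw [if_neg (by omega)]
        rfl
      · rw [iter_skip target _ 1 (by omega), iter_skip target _ 2 (by omega), iter_skip target _ 3 (by omega), iter_skip target _ 4 (by omega), iter_skip target _ 5 (by omega), iter_skip target _ 6 (by omega), iter_skip target _ 7 (by omega), iter_skip target _ 9 (by omega), iter_hit target 8 hp (by omega)]
        rw [if_pos (by omega), hr]
    · -- r = 9
      by_cases hp : target - 9 - 13 < 0
      · rw [iter_skip target _ 1 (by omega), iter_skip target _ 2 (by omega), iter_skip target _ 3 (by omega), iter_skip target _ 4 (by omega), iter_skip target _ 5 (by omega), iter_skip target _ 6 (by omega), iter_skip target _ 7 (by omega), iter_skip target _ 8 (by omega), iter_neg target _ 9 hp]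
        rw [if_neg (by omega)]
        rfl
      · rw [iter_skip target _ 1 (by omega), iter_skip target _ 2 (by omega), iter_skip target _ 3 (by omega), iter_skip target _ 4 (by omega), iter_skip target _ 5 (by omega), iter_skip target _ 6 (by omega), iter_skip target _ 7 (by omega), iter_skip target _ 8 (by omega), iter_hit target 9 hp (by omega)]
        rw [if_pos (by omega), hr]
  · rw [iter_skip target _ 1 (by omega), iter_skip target _ 2 (by omega), iter_skip target _ 3 (by omega), iter_skip target _ 4 (by omega), iter_skip target _ 5 (by omega), iter_skip target _ 6 (by omega), iter_skip target _ 7 (by omega), iter_skip target _ 8 (by omega), iter_skip target _ 9 (by omega)]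
    rw [if_neg (by omega)]
    rfl
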